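-- pv_equiv track=rewrite | github.com/zswaff/advent | 2015/22/sln.py | get_fx
-- ===== SOURCE A (Python) =====
-- def get_fx(fx):
--     fx_n = dict(fx.items())
--     armor = dmg_fx = mana_heal = 0
--     for f, t in fx.items():
--         if t == 0:
--             continue
--         if f == "shield":
--             armor = 7
--         if f == "poison":
--             dmg_fx = 3
--         if f == "recharge":
--             mana_heal = 101
--         fx_n[f] = fx[f] - 1
--     return fx_n, armor, dmg_fx, mana_heal
-- ===== SOURCE B (Python) =====
-- BONUSES = {'shield': (7, 0, 0), 'poison': (0, 3, 0), 'recharge': (0, 0, 101)}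
--
--
-- def get_fx(fx):
--     active = [f for f, t in fx.items() if t != 0]
--     fx_n = {f: t - (t != 0) for f, t in fx.items()}
--     armor = sum(BONUSES.get(f, (0, 0, 0))[0] for f in active)
--     dmg_fx = sum(BONUSES.get(f, (0, 0, 0))[1] for f in active)
--     mana_heal = sum(BONUSES.get(f, (0, 0, 0))[2] for f in active)
--     return fx_n, armor, dmg_fx, mana_heal
-- ===== Notes on version B (the rewrite author's own statement) =====
-- stated objective: alternative
-- what changed: Replaces A's single fused loop (copy mutated in place with branchy flag assignments) by a staged table-driven computation: first collect the list of active effect names, then build the decremented dict by subtracting the truth value of each timer, and compute each bonus as a sum of module-level BONUSES-table entries over the active names (correct because dict keys are unique, so each sum has at most one non-zero term).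
import Mathlib
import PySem

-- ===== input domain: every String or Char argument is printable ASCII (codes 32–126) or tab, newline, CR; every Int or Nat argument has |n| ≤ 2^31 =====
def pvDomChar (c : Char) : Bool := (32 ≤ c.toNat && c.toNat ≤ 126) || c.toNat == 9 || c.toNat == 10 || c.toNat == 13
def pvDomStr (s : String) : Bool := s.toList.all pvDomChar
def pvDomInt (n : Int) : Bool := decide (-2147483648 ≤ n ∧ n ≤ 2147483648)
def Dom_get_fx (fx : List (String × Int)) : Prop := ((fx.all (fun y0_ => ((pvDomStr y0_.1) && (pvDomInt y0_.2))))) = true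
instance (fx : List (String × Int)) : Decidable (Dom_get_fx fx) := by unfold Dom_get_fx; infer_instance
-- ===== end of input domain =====

-- B replaces A's fused branchy loop by a staged, table-driven computation: it first collects the
-- active effect names, then derives the decremented dict and each bonus (a sum of table entries
-- over the active names) from that list (objective: alternative; same O(n) cost).

-- ===== PORT A =====
def get_fx (fx : List (String × Int)) : (List (String × Int)) × Int × Int × Int :=
  let d := PySem.Dict.ofList fx
  let st := d.items.foldl
    (fun (st : PySem.Dict String Int × Int × Int × Int) ft =>
      let fx_n := st.1
      let armor := st.2.1
      let dmg_fx := st.2.2.1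
      let mana_heal := st.2.2.2
      if ft.2 == 0 then st
      else
        let armor := if ft.1 == "shield" then (7 : Int) else armor
        let dmg_fx := if ft.1 == "poison" then (3 : Int) else dmg_fx
        let mana_heal := if ft.1 == "recharge" then (101 : Int) else mana_heal
        (fx_n.insert ft.1 (d.getD ft.1 0 - 1), armor, dmg_fx, mana_heal))
    (PySem.Dict.ofList d.items, 0, 0, 0)
  (st.1.items, st.2.1, st.2.2.1, st.2.2.2)

-- ===== PORT B =====
-- the module-level BONUSES table of Source B
def pvBonuses : PySem.Dict String (Int × Int × Int) :=
  PySem.Dict.ofList [("shield", (7, 0, 0)), ("poison", (0, 3, 0)), ("recharge", (0, 0, 101))]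

def get_fx_alt (fx : List (String × Int)) : (List (String × Int)) × Int × Int × Int :=
  let d := PySem.Dict.ofList fx
  let active := (d.items.filter (fun ft => ft.2 != 0)).map Prod.fst
  let fx_n := PySem.Dict.mk (d.items.map (fun ft => (ft.1, ft.2 - (if ft.2 != 0 then 1 else 0))))
  let armor := active.foldl (fun a f => a + (pvBonuses.getD f (0, 0, 0)).1) 0
  let dmg_fx := active.foldl (fun a f => a + (pvBonuses.getD f (0, 0, 0)).2.1) 0
  let mana_heal := active.foldl (fun a f => a + (pvBonuses.getD f (0, 0, 0)).2.2) 0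
  (fx_n.items, armor, dmg_fx, mana_heal)

-- ===== PRECONDITION & SPEC =====
def Spec_get_fx (fx : List (String × Int)) (out : (List (String × Int)) × Int × Int × Int) : Prop := out = get_fx_alt fx
instance (fx : List (String × Int)) (out : (List (String × Int)) × Int × Int × Int) : Decidable (Spec_get_fx fx out) := by unfold Spec_get_fx; infer_instance

-- ===== CLAIM (what is proved, stated in full; the proofs are below) =====
def Claim_equal_get_fx : Prop := ∀ (fx : List (String × Int)), Dom_get_fx fx → Spec_get_fx fx (get_fx fx)

-- ===== LEMMAS AND PROOFS =====

-- the per-entry decrement (shared shape of both programs' new dict)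
def pvDec (p : String × Int) : String × Int := (p.1, if p.2 != 0 then p.2 - 1 else p.2)

lemma pv_if_or (b c : Bool) (v a : Int) :
    (if b then v else if c then v else a) = (if (c || b) then v else a) := by
  cases b <;> cases c <;> simp

lemma pv_map_keep (pre : List (String × Int)) (k : String) (x : String × Int)
    (h : k ∉ pre.map Prod.fst) :
    pre.map (fun q => if q.1 == k then x else q) = pre := by
  induction pre with
  | nil => rfl
  | cons q t ih =>
    simp only [List.map_cons, List.mem_cons] at h ⊢
    push_neg at h
    rw [if_neg (by simp [h.1.symm]), ih h.2]

lemma pv_ofList_eq_mk (l : List (String × Int)) (h : (l.map Prod.fst).Nodup) :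
    PySem.Dict.ofList l = PySem.Dict.mk l := by
  apply PySem.Dict.ext
  show (PySem.Dict.empty.update l).items = l
  unfold PySem.Dict.update
  rw [PySem.Dict.items_foldl_insert_fresh l Prod.fst Prod.snd PySem.Dict.empty
    (fun a _ => PySem.Dict.contains_empty _) h]
  show ([] : List (String × Int)) ++ _ = l
  simp

-- invariant of A's loop over the items of a duplicate-free association list
lemma pv_fold_char (l pre : List (String × Int)) (a g m : Int)
    (h : ((pre ++ l).map Prod.fst).Nodup) :
    l.foldl (fun (st : PySem.Dict String Int × Int × Int × Int) ft =>
      if ft.2 == 0 then st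
      else
        (st.1.insert ft.1 (ft.2 - 1),
         if ft.1 == "shield" then (7 : Int) else st.2.1,
         if ft.1 == "poison" then (3 : Int) else st.2.2.1,
         if ft.1 == "recharge" then (101 : Int) else st.2.2.2))
      (PySem.Dict.mk (pre ++ l), a, g, m) =
    (PySem.Dict.mk (pre ++ l.map pvDec),
     if l.any (fun p => p.1 == "shield" && !(p.2 == 0)) then 7 else a,
     if l.any (fun p => p.1 == "poison" && !(p.2 == 0)) then 3 else g,
     if l.any (fun p => p.1 == "recharge" && !(p.2 == 0)) then 101 else m) := by
  induction l generalizing pre a g m with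
  | nil => simp
  | cons p l' ih =>
    have hmap : ((pre ++ p :: l').map Prod.fst) = pre.map Prod.fst ++ p.1 :: l'.map Prod.fst := by
      simp
    rw [hmap] at h
    have hkey : (pvDec p).1 = p.1 := rfl
    have hrest : (((pre ++ [pvDec p]) ++ l').map Prod.fst).Nodup := by
      have hm2 : ((pre ++ [pvDec p]) ++ l').map Prod.fst
          = pre.map Prod.fst ++ p.1 :: l'.map Prod.fst := by simp [hkey]
      rw [hm2]; exact h
    rw [List.nodup_append] at h
    have hnotpre : p.1 ∉ pre.map Prod.fst :=
      fun hm => h.2.2 p.1 hm p.1 List.mem_cons_self rfl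
    have hcons := h.2.1
    rw [List.nodup_cons] at hcons
    have hnotl' : p.1 ∉ l'.map Prod.fst := hcons.1
    rw [List.foldl_cons]
    by_cases hp : p.2 = 0
    · have hd : pvDec p = p := by
        cases p with | mk f t => simp [pvDec] at *; simp [hp]
      have hstep : (if (p.2 == 0) = true then (PySem.Dict.mk (pre ++ p :: l'), a, g, m)
        else ((PySem.Dict.mk (pre ++ p :: l')).insert p.1 (p.2 - 1),
         if p.1 == "shield" then (7:Int) else a,
         if p.1 == "poison" then (3:Int) else g,
         if p.1 == "recharge" then (101:Int) else m)) = (PySem.Dict.mk ((pre ++ [pvDec p]) ++ l'), a, g, m) := by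
        simp [hp, hd]
      rw [hstep, ih (pre ++ [pvDec p]) a g m hrest]
      have hf : ∀ k : String, (p.1 == k && !(p.2 == 0)) = false := by
        intro k; simp [hp]
      simp only [List.map_cons, hd, List.any_cons, hf, Bool.false_or]
      simp
    · have hbp : (p.2 == 0) = false := by simp [hp]
      have hcontains : (PySem.Dict.mk (pre ++ p :: l')).contains p.1 = true := by
        rw [PySem.Dict.contains_iff_mem_keys]
        show p.1 ∈ (PySem.Dict.mk (pre ++ p :: l')).items.map Prod.fst
        simp
      have hitems : ((PySem.Dict.mk (pre ++ p :: l')).insert p.1 (p.2 - 1)).items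
          = (pre ++ [pvDec p]) ++ l' := by
        rw [PySem.Dict.items_insert_of_contains _ _ hcontains]
        show (pre ++ p :: l').map (fun q => if q.1 == p.1 then (p.1, p.2 - 1) else q) = _
        rw [List.map_append, pv_map_keep pre p.1 _ hnotpre, List.map_cons,
          pv_map_keep l' p.1 _ hnotl']
        have : (if (p.1 == p.1) = true then (p.1, p.2 - 1) else p) = pvDec p := by
          simp [pvDec, hp]
        rw [this]; simp
      have hstep : (if (p.2 == 0) = true then (PySem.Dict.mk (pre ++ p :: l'), a, g, m)
        else ((PySem.Dict.mk (pre ++ p :: l')).insert p.1 (p.2 - 1),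
         if p.1 == "shield" then (7:Int) else a,
         if p.1 == "poison" then (3:Int) else g,
         if p.1 == "recharge" then (101:Int) else m)) =
        (PySem.Dict.mk ((pre ++ [pvDec p]) ++ l'),
         if p.1 == "shield" then (7:Int) else a,
         if p.1 == "poison" then (3:Int) else g,
         if p.1 == "recharge" then (101:Int) else m) := by
        rw [if_neg (by simp [hbp])]
        exact congrArg (fun d => (d, _, _, _)) (PySem.Dict.ext hitems)
      rw [hstep, ih (pre ++ [pvDec p]) _ _ _ hrest]
      refine Prod.ext ?_ (Prod.ext ?_ (Prod.ext ?_ ?_)) <;>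
        simp only [List.any_cons, List.map_append, List.map_cons, List.append_assoc,
          List.singleton_append, List.map_nil, hbp, Bool.not_false, Bool.and_true,
          pv_if_or] <;> simp [pvDec]

-- what the BONUSES table lookup returns on an arbitrary key
lemma pv_bonus_getD (f : String) :
    pvBonuses.getD f (0, 0, 0) =
      if f == "shield" then ((7 : Int), (0 : Int), (0 : Int))
      else if f == "poison" then (0, 3, 0)
      else if f == "recharge" then (0, 0, 101)
      else (0, 0, 0) := by
  have hb : pvBonuses = ((PySem.Dict.empty.insert "shield" ((7:Int),(0:Int),(0:Int))).insert
      "poison" ((0:Int),(3:Int),(0:Int))).insert "recharge" ((0:Int),(0:Int),(101:Int)) := rfl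
  rw [hb, PySem.Dict.getD_insert, PySem.Dict.getD_insert, PySem.Dict.getD_insert,
    PySem.Dict.getD_empty]
  by_cases h1 : f = "shield" <;> by_cases h2 : f = "poison" <;> by_cases h3 : f = "recharge" <;>
    simp_all

-- a left fold of 'add the value when the key matches' over a duplicate-free list is a single lookup
lemma pv_sum_single (l : List String) (k : String) (v init : Int) (h : l.Nodup) :
    l.foldl (fun a f => a + (if f == k then v else 0)) init
      = init + (if k ∈ l then v else 0) := by
  induction l generalizing init with
  | nil => simp
  | cons x t ih =>
    rw [List.nodup_cons] at h
    rw [List.foldl_cons, ih _ h.2]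
    by_cases hx : x = k
    · subst hx
      simp [h.1]
    · have hbx : (x == k) = false := by simp [hx]
      simp [hbx, Ne.symm hx]

-- membership in B's active-name list, as A's Boolean existence test
lemma pv_mem_active (l : List (String × Int)) (k : String) :
    (k ∈ (l.filter (fun ft => ft.2 != 0)).map Prod.fst)
      ↔ l.any (fun p => p.1 == k && !(p.2 == 0)) = true := by
  simp [List.mem_map, List.mem_filter, List.any_eq_true]

-- one bonus component of B equals A's flag, given duplicate-free keys
lemma pv_bonus_fold (l : List (String × Int)) (k : String) (v : Int)
    (h : (l.map Prod.fst).Nodup) :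
    ((l.filter (fun ft => ft.2 != 0)).map Prod.fst).foldl
        (fun a f => a + (if f == k then v else 0)) 0
      = if l.any (fun p => p.1 == k && !(p.2 == 0)) then v else 0 := by
  have hnd : ((l.filter (fun ft => ft.2 != 0)).map Prod.fst).Nodup :=
    (List.Sublist.map Prod.fst List.filter_sublist).nodup h
  rw [pv_sum_single _ _ _ _ hnd, zero_add]
  exact if_congr (pv_mem_active l k) rfl rfl

-- ===== VERDICT (by name: the statement is the Claim_ definition above) =====
set_option maxHeartbeats 2000000 in
theorem get_fx_spec : Claim_equal_get_fx := by
  intro fx _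
  show get_fx fx = get_fx_alt fx
  unfold get_fx get_fx_alt
  dsimp only
  have hnd : (PySem.Dict.ofList fx).keys.Nodup := PySem.Dict.nodup_keys_ofList fx
  have hnd' : ((PySem.Dict.ofList fx).items.map Prod.fst).Nodup := hnd
  -- A side: replace 'd.getD ft.1 0' by 'ft.2' inside the loop, then characterize it
  rw [PySem.List.foldl_congr_mem _ _
    (fun (st : PySem.Dict String Int × Int × Int × Int) ft =>
      if ft.2 == 0 then st
      else
        (st.1.insert ft.1 (ft.2 - 1),
         if ft.1 == "shield" then (7 : Int) else st.2.1,
         if ft.1 == "poison" then (3 : Int) else st.2.2.1,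
         if ft.1 == "recharge" then (101 : Int) else st.2.2.2)) _
    (by
      intro acc x hx
      have : (PySem.Dict.ofList fx).getD x.1 0 = x.2 :=
        PySem.Dict.getD_of_mem_items _ hx hnd 0
      simp [this])]
  rw [pv_ofList_eq_mk _ hnd']
  have hchar := pv_fold_char (PySem.Dict.ofList fx).items [] 0 0 0 (by simpa using hnd')
  simp only [List.nil_append] at hchar
  rw [hchar]
  -- B side: rewrite the table lookups to matched-key adds, then collapse each fold
  have hB : ∀ k v (sel : Int × Int × Int → Int),
      (∀ f, sel (pvBonuses.getD f (0, 0, 0)) = if f == k then v else 0) →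
      (((PySem.Dict.ofList fx).items.filter (fun ft => ft.2 != 0)).map Prod.fst).foldl
          (fun a f => a + sel (pvBonuses.getD f (0, 0, 0))) 0
        = if (PySem.Dict.ofList fx).items.any (fun p => p.1 == k && !(p.2 == 0)) then v else 0 := by
    intro k v sel hsel
    rw [PySem.List.foldl_congr_mem _ _ (fun a f => a + (if f == k then v else 0)) _
      (by intro acc x _; rw [hsel])]
    exact pv_bonus_fold _ _ _ hnd'
  rw [hB "shield" 7 (fun t => t.1)
      (by intro f; rw [pv_bonus_getD]; by_cases h1 : (f == "shield") = true <;> split_ifs <;> simp_all),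
    hB "poison" 3 (fun t => t.2.1)
      (by intro f; rw [pv_bonus_getD]; by_cases h1 : (f == "poison") = true <;> split_ifs <;> simp_all),
    hB "recharge" 101 (fun t => t.2.2)
      (by intro f; rw [pv_bonus_getD]; by_cases h1 : (f == "recharge") = true <;> split_ifs <;> simp_all)]
  -- the new dict: both are Dict.mk of the pointwise-decremented items
  have hm : ((PySem.Dict.ofList fx).items.map (fun ft => (ft.1, ft.2 - (if ft.2 != 0 then 1 else 0))))
      = (PySem.Dict.ofList fx).items.map pvDec := by
    apply List.map_congr_left
    intro p _
    by_cases hp : p.2 = 0 <;> simp [pvDec, hp]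
  rw [hm]
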